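-- pv_equiv track=rewrite | github.com/SRK-5HAH/shoppinglist | app.py | ordered_stores
-- ===== SOURCE A (Python) =====
-- from typing import Dict, List, Any, Tuple
--
-- def ordered_stores(store_order: List[str], stores: Dict[str, Any]) -> List[str]:
--     """
--     Return stores in visit order first, then anything else alphabetically.
--     """
--     seen = set()
--     out: List[str] = []
--
--     for s in store_order:
--         if s in stores and s not in seen:
--             out.append(s)
--             seen.add(s)
--
--     for s in sorted(stores.keys(), key=lambda x: x.lower()):
--         if s not in seen:
--             out.append(s)
--             seen.add(s)
--
--     return out
-- ===== SOURCE B (Python) =====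
-- from typing import Dict, List, Any
--
-- def ordered_stores(store_order: List[str], stores: Dict[str, Any]) -> List[str]:
--     """
--     Return stores in visit order first, then anything else alphabetically.
--     One pass to index first occurrences, then a single stable sort.
--     """
--     pos: Dict[str, int] = {}
--     for s in store_order:
--         if s not in pos:
--             pos[s] = len(pos)
--     n = len(store_order)
--     return sorted(stores.keys(), key=lambda s: (pos.get(s, n), s.lower()))
-- ===== Notes on version B (the rewrite author's own statement) =====
-- stated objective: alternative
-- what changed: Replaces A's two sequential filtering passes with a shared 'seen' set by building a first-occurrence rank index over store_order once and producing the result with a single stable sort of stores.keys() under the key (rank-or-n, lowercased name).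
import Mathlib
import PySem

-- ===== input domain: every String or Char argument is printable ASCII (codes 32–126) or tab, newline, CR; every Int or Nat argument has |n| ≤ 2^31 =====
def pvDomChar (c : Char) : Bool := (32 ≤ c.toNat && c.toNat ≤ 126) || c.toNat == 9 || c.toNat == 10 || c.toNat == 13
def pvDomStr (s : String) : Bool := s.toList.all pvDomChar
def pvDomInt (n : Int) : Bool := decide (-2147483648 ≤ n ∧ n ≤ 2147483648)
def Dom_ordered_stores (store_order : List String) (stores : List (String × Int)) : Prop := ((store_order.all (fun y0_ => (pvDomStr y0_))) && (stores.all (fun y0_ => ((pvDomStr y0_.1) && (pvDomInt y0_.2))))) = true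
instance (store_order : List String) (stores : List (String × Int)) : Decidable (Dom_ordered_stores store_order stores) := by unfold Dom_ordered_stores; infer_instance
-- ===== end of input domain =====

-- B replaces A's two sequential filtering passes (visit-order pass with a 'seen' set, then a second
-- pass over the alphabetically sorted keys) by one first-occurrence rank index over store_order plus
-- a SINGLE stable sort of the dict's keys under the key (rank-or-n, lowered name); objective:
-- alternative (a different algorithm of similar cost).

-- ===== PORT A =====
def ordered_stores (store_order : List String) (stores : List (String × Int)) : List String :=
  let d := PySem.Dict.ofList stores
  let r1 := store_order.foldl
    (fun (acc : PySem.Set String × List String) s =>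
      if d.contains s && !(PySem.Set.contains acc.1 s) then (PySem.Set.add acc.1 s, acc.2 ++ [s])
      else acc)
    (PySem.Set.empty, [])
  let r2 := (PySem.List.sorted d.keys (fun x => PySem.Str.lower x)).foldl
    (fun (acc : PySem.Set String × List String) s =>
      if !(PySem.Set.contains acc.1 s) then (PySem.Set.add acc.1 s, acc.2 ++ [s])
      else acc)
    r1
  r2.2

-- ===== PORT B =====
-- Python's tuple sort key (pos.get(s, n), s.lower()) is ported as a lexicographic pair
-- 'Lex (Int × String)' (exact: Python compares tuples lexicographically and strings by code point).
def ordered_stores_alt (store_order : List String) (stores : List (String × Int)) : List String :=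
  let pos := store_order.foldl
    (fun (p : PySem.Dict String Int) s =>
      if !(p.contains s) then p.insert s (p.size : Int) else p)
    PySem.Dict.empty
  let n : Int := store_order.length
  PySem.List.sorted (PySem.Dict.ofList stores).keys
    (fun s => toLex ((pos.getD s n, PySem.Str.lower s) : Int × String))

-- ===== PRECONDITION & SPEC =====
def Spec_ordered_stores (store_order : List String) (stores : List (String × Int)) (out : List String) : Prop := out = ordered_stores_alt store_order stores
instance (store_order : List String) (stores : List (String × Int)) (out : List String) : Decidable (Spec_ordered_stores store_order stores out) := by unfold Spec_ordered_stores; infer_instance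

-- ===== CLAIM (what is proved, stated in full; the proofs are below) =====
def Claim_equal_ordered_stores : Prop := ∀ (store_order : List String) (stores : List (String × Int)), Dom_ordered_stores store_order stores → Spec_ordered_stores store_order stores (ordered_stores store_order stores)

-- ===== LEMMAS AND PROOFS =====

-- ---- generic lemmas about PySem's stable insertion sort ----


theorem pv_insertBy_nil {α : Type} (before : α → α → Bool) (x : α) :
    PySem.List.insertBy before x [] = [x] := by simp [PySem.List.insertBy]

theorem pv_insertBy_cons {α : Type} (before : α → α → Bool) (x y : α) (ys : List α) :
    PySem.List.insertBy before x (y :: ys) =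
      if before x y then x :: y :: ys else y :: PySem.List.insertBy before x ys := by
  simp [PySem.List.insertBy]

theorem pv_pairwise_insertBy {α κ : Type} [LinearOrder κ] (key : α → κ) (x : α) (l : List α)
    (hl : l.Pairwise (fun a b => key a ≤ key b)) :
    (PySem.List.insertBy (fun a b => decide (key a < key b)) x l).Pairwise
      (fun a b => key a ≤ key b) := by
  induction l with
  | nil => simp [pv_insertBy_nil]
  | cons y t ih =>
    rw [pv_insertBy_cons]
    rcases List.pairwise_cons.mp hl with ⟨hy, ht⟩
    by_cases h : key x < key y
    · simp only [h, decide_true, if_true]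
      refine List.pairwise_cons.mpr ⟨?_, hl⟩
      intro b hb
      rcases List.mem_cons.mp hb with rfl | hb
      · exact le_of_lt h
      · exact le_trans (le_of_lt h) (hy b hb)
    · simp only [h, decide_false, if_false]
      refine List.pairwise_cons.mpr ⟨?_, ih ht⟩
      intro b hb
      rcases (PySem.List.mem_insertBy _ _ _ _).mp hb with rfl | hb
      · exact le_of_not_gt h
      · exact hy b hb

theorem pv_filter_insertBy_neg {α : Type} (before : α → α → Bool) (q : α → Bool)
    (x : α) (l : List α) (hx : q x = false) :
    (PySem.List.insertBy before x l).filter q = l.filter q := by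
  induction l with
  | nil => simp [pv_insertBy_nil, hx]
  | cons y t ih =>
    rw [pv_insertBy_cons]
    by_cases h : before x y
    · simp [h, hx]
    · simp [h, List.filter_cons, ih]

theorem pv_insertBy_all_before {α : Type} (before : α → α → Bool) (x : α) (l : List α)
    (h : ∀ b ∈ l, before x b = true) :
    PySem.List.insertBy before x l = x :: l := by
  cases l with
  | nil => simp [pv_insertBy_nil]
  | cons y t => rw [pv_insertBy_cons]; simp [h y (List.mem_cons_self)]

theorem pv_filter_insertBy_pos {α κ : Type} [LinearOrder κ] (key : α → κ) (q : α → Bool)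
    (x : α) (l : List α) (hx : q x = true) (hl : l.Pairwise (fun a b => key a ≤ key b)) :
    (PySem.List.insertBy (fun a b => decide (key a < key b)) x l).filter q =
      PySem.List.insertBy (fun a b => decide (key a < key b)) x (l.filter q) := by
  induction l with
  | nil => simp [pv_insertBy_nil, hx]
  | cons y t ih =>
    rcases List.pairwise_cons.mp hl with ⟨hy, ht⟩
    rw [pv_insertBy_cons]
    by_cases h : key x < key y
    · simp only [decide_eq_true_eq, h, if_true]
      rw [List.filter_cons, List.filter_cons]
      by_cases hqy : q y
      · simp only [hqy, hx, if_true]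
        rw [pv_insertBy_cons]; simp [h]
      · simp only [hqy, hx, if_true, if_false, List.filter_cons]
        rw [pv_insertBy_all_before]
        intro b hb
        rcases List.mem_filter.mp hb with ⟨hbt, _⟩
        exact decide_eq_true (lt_of_lt_of_le h (hy b hbt))
    · simp only [decide_eq_true_eq, h, if_false]
      rw [List.filter_cons, List.filter_cons]
      by_cases hqy : q y
      · simp only [hqy, if_true]
        rw [pv_insertBy_cons]
        simp only [decide_eq_true_eq, h, if_false]
        rw [ih ht]
      · simp only [hqy, if_false]
        exact ih ht

theorem pv_filter_foldl_insertBy {α κ : Type} [LinearOrder κ] (key : α → κ) (q : α → Bool)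
    (xs : List α) (acc : List α) (hacc : acc.Pairwise (fun a b => key a ≤ key b)) :
    (xs.foldl (fun a x => PySem.List.insertBy (fun a b => decide (key a < key b)) x a) acc).filter q
      = (xs.filter q).foldl (fun a x => PySem.List.insertBy (fun a b => decide (key a < key b)) x a)
          (acc.filter q) := by
  induction xs generalizing acc with
  | nil => simp
  | cons x t ih =>
    simp only [List.foldl_cons, List.filter_cons]
    by_cases hq : q x
    · simp only [hq, if_true]
      rw [ih _ (pv_pairwise_insertBy key x acc hacc), pv_filter_insertBy_pos key q x acc hq hacc]
      simp
    · simp only [hq, if_false]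
      rw [ih _ (pv_pairwise_insertBy key x acc hacc),
        pv_filter_insertBy_neg _ q x acc (by simpa using hq)]
      simp

theorem pv_filter_sorted {α κ : Type} [LinearOrder κ] (key : α → κ) (q : α → Bool) (xs : List α) :
    (PySem.List.sorted xs key).filter q = PySem.List.sorted (xs.filter q) key := by
  rw [PySem.List.sorted_eq_foldl_insertBy, PySem.List.sorted_eq_foldl_insertBy]
  simpa using pv_filter_foldl_insertBy key q xs [] (by simp)

theorem pv_insertBy_congr {α : Type} (bf1 bf2 : α → α → Bool) (x : α) (l : List α)
    (h : ∀ b ∈ l, bf1 x b = bf2 x b) :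
    PySem.List.insertBy bf1 x l = PySem.List.insertBy bf2 x l := by
  induction l with
  | nil => rw [pv_insertBy_nil, pv_insertBy_nil]
  | cons y t ih =>
    rw [pv_insertBy_cons, pv_insertBy_cons, h y (List.mem_cons_self),
      ih (fun b hb => h b (List.mem_cons_of_mem y hb))]

theorem pv_sorted_congr {α κ₁ κ₂ : Type} [LinearOrder κ₁] [LinearOrder κ₂]
    (key1 : α → κ₁) (key2 : α → κ₂) (xs : List α)
    (h : ∀ a b, a ∈ xs → b ∈ xs → (decide (key1 a < key1 b) = decide (key2 a < key2 b))) :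
    PySem.List.sorted xs key1 = PySem.List.sorted xs key2 := by
  rw [PySem.List.sorted_eq_foldl_insertBy, PySem.List.sorted_eq_foldl_insertBy]
  have main : ∀ (t acc : List α), (∀ a ∈ t, a ∈ xs) → (∀ a ∈ acc, a ∈ xs) →
      t.foldl (fun a x => PySem.List.insertBy (fun a b => decide (key1 a < key1 b)) x a) acc
        = t.foldl (fun a x => PySem.List.insertBy (fun a b => decide (key2 a < key2 b)) x a) acc := by
    intro t
    induction t with
    | nil => intro acc _ _; simp
    | cons x t ih =>
      intro acc ht hacc
      simp only [List.foldl_cons]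
      rw [pv_insertBy_congr (fun a b => decide (key1 a < key1 b)) (fun a b => decide (key2 a < key2 b)) x acc
        (fun b hb => h x b (ht x List.mem_cons_self) (hacc b hb)),
        ih _ (fun a ha => ht a (List.mem_cons_of_mem x ha))
          (fun a ha => by
            rcases (PySem.List.mem_insertBy _ _ _ _).mp ha with rfl | ha
            · exact ht a List.mem_cons_self
            · exact hacc a ha)]
  exact main xs [] (fun a ha => ha) (by simp)

theorem pv_sorted_sep {α κ : Type} [LinearOrder κ] (key : α → κ) (p : α → Bool) (l : List α)
    (hl : l.Pairwise (fun a b => key a ≤ key b))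
    (hsep : ∀ a b, a ∈ l → b ∈ l → p a = true → p b = false → key a < key b) :
    l = l.filter p ++ l.filter (fun x => !p x) := by
  induction l with
  | nil => simp
  | cons x t ih =>
    rcases List.pairwise_cons.mp hl with ⟨hx, ht⟩
    by_cases hp : p x
    · have := ih ht (fun a b ha hb => hsep a b (List.mem_cons_of_mem x ha) (List.mem_cons_of_mem x hb))
      conv_lhs => rw [this]
      simp [List.filter_cons, hp]
    · have hnone : t.filter p = [] := by
        rw [List.filter_eq_nil_iff]
        intro a ha hpa
        have h1 := hsep a x (List.mem_cons_of_mem x ha) List.mem_cons_self hpa (by simpa using hp)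
        exact absurd (hx a ha) (not_le.mpr h1)
      have := ih ht (fun a b ha hb => hsep a b (List.mem_cons_of_mem x ha) (List.mem_cons_of_mem x hb))
      rw [hnone] at this
      simp only [List.nil_append] at this
      conv_lhs => rw [this]
      simp [List.filter_cons, hp, hnone]

-- ---- characterisation of A's two passes ----

def pvDed (d : PySem.Dict String Int) : List String → PySem.Set String → List String
  | [], _ => []
  | s :: t, seen =>
      if d.contains s && !(PySem.Set.contains seen s) then s :: pvDed d t (PySem.Set.add seen s)
      else pvDed d t seen

def pvDseen (d : PySem.Dict String Int) : List String → PySem.Set String → PySem.Set String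
  | [], seen => seen
  | s :: t, seen =>
      if d.contains s && !(PySem.Set.contains seen s) then pvDseen d t (PySem.Set.add seen s)
      else pvDseen d t seen

theorem pv_guard_true {d : PySem.Dict String Int} {seen : PySem.Set String} {s : String}
    (h : (d.contains s && !(PySem.Set.contains seen s)) = true) :
    d.contains s = true ∧ s ∉ seen := by
  simp only [Bool.and_eq_true, Bool.not_eq_true'] at h
  refine ⟨h.1, fun hm => ?_⟩
  rw [(PySem.Set.contains_iff seen s).mpr hm] at h
  exact Bool.false_ne_true h.2.symm

theorem pv_guard_false {d : PySem.Dict String Int} {seen : PySem.Set String} {s : String}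
    (h : ¬ (d.contains s && !(PySem.Set.contains seen s)) = true)
    (hc : d.contains s = true) : s ∈ seen := by
  simp only [Bool.and_eq_true, Bool.not_eq_true', hc, true_and, Bool.not_eq_false] at h
  exact (PySem.Set.contains_iff seen s).mp h

theorem pv_pass1_eq (d : PySem.Dict String Int) (ord : List String) (seen : PySem.Set String)
    (out : List String) :
    ord.foldl
      (fun (acc : PySem.Set String × List String) s =>
        if d.contains s && !(PySem.Set.contains acc.1 s) then (PySem.Set.add acc.1 s, acc.2 ++ [s])
        else acc) (seen, out)
      = (pvDseen d ord seen, out ++ pvDed d ord seen) := by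
  induction ord generalizing seen out with
  | nil => simp [pvDed, pvDseen]
  | cons s t ih =>
    rw [List.foldl_cons]
    dsimp only
    by_cases h : (d.contains s && !(PySem.Set.contains seen s)) = true
    · rw [if_pos h, ih, pvDed, pvDseen, if_pos h, if_pos h, List.append_assoc]
      rfl
    · rw [if_neg h, ih, pvDed, pvDseen, if_neg h, if_neg h]

theorem pv_mem_ded (d : PySem.Dict String Int) (ord : List String) (seen : PySem.Set String)
    (x : String) :
    x ∈ pvDed d ord seen ↔ x ∈ ord ∧ d.contains x = true ∧ x ∉ seen := by
  induction ord generalizing seen with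
  | nil => simp [pvDed]
  | cons s t ih =>
    rw [pvDed]
    by_cases h : (d.contains s && !(PySem.Set.contains seen s)) = true
    · rcases pv_guard_true h with ⟨hc, hnsm⟩
      rw [if_pos h]
      simp only [List.mem_cons, ih, PySem.Set.mem_add]
      constructor
      · rintro (rfl | ⟨hxt, hcx, hxs⟩)
        · exact ⟨Or.inl rfl, hc, hnsm⟩
        · exact ⟨Or.inr hxt, hcx, fun hm => hxs (Or.inl hm)⟩
      · rintro ⟨rfl | hxt, hcx, hxs⟩
        · exact Or.inl rfl
        · by_cases hxeq : x = s
          · exact Or.inl hxeq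
          · refine Or.inr ⟨hxt, hcx, fun hm => ?_⟩
            rcases hm with hm | hm
            · exact hxs hm
            · exact hxeq hm
    · rw [if_neg h]
      simp only [ih, List.mem_cons]
      constructor
      · rintro ⟨hxt, hcx, hxs⟩
        exact ⟨Or.inr hxt, hcx, hxs⟩
      · rintro ⟨rfl | hxt, hcx, hxs⟩
        · exact absurd (pv_guard_false h hcx) hxs
        · exact ⟨hxt, hcx, hxs⟩

theorem pv_nodup_ded (d : PySem.Dict String Int) (ord : List String) (seen : PySem.Set String) :
    (pvDed d ord seen).Nodup := by
  induction ord generalizing seen with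
  | nil => simp [pvDed]
  | cons s t ih =>
    rw [pvDed]
    by_cases h : (d.contains s && !(PySem.Set.contains seen s)) = true
    · rw [if_pos h]
      rw [List.nodup_cons]
      refine ⟨fun hm => ?_, ih _⟩
      rcases (pv_mem_ded d t _ s).mp hm with ⟨_, _, hns⟩
      exact hns ((PySem.Set.mem_add _ _ _).mpr (Or.inr rfl))
    · rw [if_neg h]; exact ih _

theorem pv_mem_dseen (d : PySem.Dict String Int) (ord : List String) (seen : PySem.Set String)
    (x : String) :
    x ∈ pvDseen d ord seen ↔ x ∈ seen ∨ (x ∈ ord ∧ d.contains x = true) := by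
  induction ord generalizing seen with
  | nil => simp [pvDseen]
  | cons s t ih =>
    rw [pvDseen]
    by_cases h : (d.contains s && !(PySem.Set.contains seen s)) = true
    · rcases pv_guard_true h with ⟨hc, _⟩
      rw [if_pos h]
      simp only [ih, PySem.Set.mem_add, List.mem_cons]
      constructor
      · rintro ((hm | rfl) | ⟨hxt, hcx⟩)
        · exact Or.inl hm
        · exact Or.inr ⟨Or.inl rfl, hc⟩
        · exact Or.inr ⟨Or.inr hxt, hcx⟩
      · rintro (hm | ⟨rfl | hxt, hcx⟩)
        · exact Or.inl (Or.inl hm)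
        · exact Or.inl (Or.inr rfl)
        · exact Or.inr ⟨hxt, hcx⟩
    · rw [if_neg h]
      simp only [ih, List.mem_cons]
      constructor
      · rintro (hm | ⟨hxt, hcx⟩)
        · exact Or.inl hm
        · exact Or.inr ⟨Or.inr hxt, hcx⟩
      · rintro (hm | ⟨rfl | hxt, hcx⟩)
        · exact Or.inl hm
        · exact Or.inl (pv_guard_false h hcx)
        · exact Or.inr ⟨hxt, hcx⟩

theorem pv_pass2_eq (l : List String) (hl : l.Nodup) :
    ∀ (seen : PySem.Set String) (out : List String),
    (l.foldl
      (fun (acc : PySem.Set String × List String) s =>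
        if !(PySem.Set.contains acc.1 s) then (PySem.Set.add acc.1 s, acc.2 ++ [s])
        else acc) (seen, out)).2
      = out ++ l.filter (fun s => !(PySem.Set.contains seen s)) := by
  induction l with
  | nil => intro seen out; simp
  | cons s t ih =>
    intro seen out
    rcases List.nodup_cons.mp hl with ⟨hs, ht⟩
    rw [List.foldl_cons, List.filter_cons]
    dsimp only
    by_cases h : (!(PySem.Set.contains seen s)) = true
    · rw [if_pos h, if_pos h, ih ht (PySem.Set.add seen s) (out ++ [s])]
      have heq : t.filter (fun x => !(PySem.Set.contains (PySem.Set.add seen s) x))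
          = t.filter (fun x => !(PySem.Set.contains seen x)) := by
        apply List.filter_congr
        intro x hx
        have hxs : x ≠ s := fun hxe => hs (hxe ▸ hx)
        apply congrArg
        rw [Bool.eq_iff_iff, PySem.Set.contains_iff, PySem.Set.contains_iff, PySem.Set.mem_add]
        constructor
        · rintro (hm | rfl)
          · exact hm
          · exact absurd rfl hxs
        · exact Or.inl
      rw [heq, List.append_assoc]
      rfl
    · rw [if_neg h, if_neg h, ih ht seen out]

-- ---- characterisation of B's first-occurrence rank dictionary ----

def pvPfold (l : List String) (p : PySem.Dict String Int) : PySem.Dict String Int :=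
  l.foldl (fun (p : PySem.Dict String Int) s =>
    if !(p.contains s) then p.insert s (p.size : Int) else p) p

theorem pvPfold_nil (p : PySem.Dict String Int) : pvPfold [] p = p := rfl

theorem pvPfold_cons (s : String) (t : List String) (p : PySem.Dict String Int) :
    pvPfold (s :: t) p = pvPfold t (if !(p.contains s) then p.insert s (p.size : Int) else p) := rfl

theorem pv_contains_pfold (l : List String) (p : PySem.Dict String Int) (x : String) :
    (pvPfold l p).contains x = (p.contains x || decide (x ∈ l)) := by
  induction l generalizing p with
  | nil => simp [pvPfold_nil]
  | cons s t ih =>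
    rw [pvPfold_cons]
    by_cases h : (!(p.contains s)) = true
    · rw [if_pos h, ih]
      rw [PySem.Dict.contains_insert]
      simp only [List.mem_cons]
      by_cases hx : x = s
      · simp [hx]
      · have hbeq : (x == s) = false := beq_eq_false_iff_ne.mpr hx
        simp [hbeq, hx]
    · rw [if_neg h, ih]
      rw [Bool.not_eq_true, Bool.not_eq_false'] at h
      simp only [List.mem_cons]
      by_cases hx : x = s
      · subst hx; simp [h]
      · simp [hx]

theorem pv_pfold_stable (l : List String) (p : PySem.Dict String Int) (x : String) (n : Int)
    (hx : p.contains x = true) : (pvPfold l p).getD x n = p.getD x n := by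
  induction l generalizing p with
  | nil => rfl
  | cons s t ih =>
    rw [pvPfold_cons]
    by_cases h : (!(p.contains s)) = true
    · rw [if_pos h]
      have hxs : x ≠ s := by
        rintro rfl
        rw [Bool.not_eq_true'] at h
        rw [h] at hx
        cases hx
      rw [ih _ (by rw [PySem.Dict.contains_insert]; simp [hx]),
        PySem.Dict.getD_insert]
      simp [hxs]
    · rw [if_neg h]; exact ih _ hx

theorem pv_pfold_lower (l : List String) (p : PySem.Dict String Int) (x : String) (n : Int)
    (hx : p.contains x = false) (hmem : x ∈ l) :
    (p.size : Int) ≤ (pvPfold l p).getD x n := by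
  induction l generalizing p with
  | nil => cases hmem
  | cons s t ih =>
    rw [pvPfold_cons]
    by_cases h : (!(p.contains s)) = true
    · rw [if_pos h]
      by_cases hxs : x = s
      · subst hxs
        rw [pv_pfold_stable _ _ _ _ (PySem.Dict.contains_insert_self p x _),
          PySem.Dict.getD_insert_self]
      · have hmem' : x ∈ t := by
          rcases List.mem_cons.mp hmem with rfl | hm
          · exact absurd rfl hxs
          · exact hm
        have := ih (p.insert s (p.size : Int))
          (by rw [PySem.Dict.contains_insert]; simp [hxs, hx]) hmem'
        have hs : (p.insert s (p.size : Int)).size = p.size + 1 := by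
          have h' := h
          rw [Bool.not_eq_true'] at h'
          rw [PySem.Dict.size_insert, h']
          simp
        rw [hs] at this
        omega
    · rw [if_neg h]
      have hxs : x ≠ s := by
        rintro rfl
        rw [Bool.not_eq_true, Bool.not_eq_false'] at h
        rw [h] at hx; cases hx
      have hmem' : x ∈ t := by
        rcases List.mem_cons.mp hmem with rfl | hm
        · exact absurd rfl hxs
        · exact hm
      exact ih p hx hmem'

theorem pv_pfold_upper (l : List String) (p : PySem.Dict String Int) (x : String) (n : Int)
    (hp : ∀ y, p.contains y = true → p.getD y n < (p.size : Int))
    (hx : (pvPfold l p).contains x = true) :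
    (pvPfold l p).getD x n < (p.size : Int) + l.length := by
  induction l generalizing p with
  | nil =>
    rw [pvPfold_nil] at hx ⊢
    simpa using hp x hx
  | cons s t ih =>
    rw [pvPfold_cons] at hx ⊢
    by_cases h : (!(p.contains s)) = true
    · rw [if_pos h] at hx ⊢
      have hps : p.contains s = false := by
        rw [Bool.not_eq_true'] at h; exact h
      have hs : (p.insert s (p.size : Int)).size = p.size + 1 := by
        rw [PySem.Dict.size_insert, hps]; simp
      have hp' : ∀ y, (p.insert s (p.size : Int)).contains y = true →
          (p.insert s (p.size : Int)).getD y n < ((p.insert s (p.size : Int)).size : Int) := by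
        intro y hy
        rw [PySem.Dict.getD_insert, hs]
        by_cases hys : y = s
        · simp [hys]
        · rw [if_neg hys]
          rw [PySem.Dict.contains_insert] at hy
          have : p.contains y = true := by
            rcases Bool.or_eq_true_iff.mp hy with h1 | h1
            · exact absurd (by simpa using h1) hys
            · exact h1
          have := hp y this
          push_cast
          omega
      have := ih _ hp' hx
      rw [hs] at this
      simp only [List.length_cons]
      push_cast at this ⊢
      omega
    · rw [if_neg h] at hx ⊢
      have := ih _ hp hx
      simp only [List.length_cons]
      omega

theorem pv_ded_pairwise (d : PySem.Dict String Int) (n : Int) (ord : List String)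
    (seen : PySem.Set String) (p : PySem.Dict String Int)
    (H1 : ∀ x, d.contains x = true → (p.contains x = true ↔ x ∈ seen)) :
    (pvDed d ord seen).Pairwise
      (fun a b => (pvPfold ord p).getD a n < (pvPfold ord p).getD b n) := by
  induction ord generalizing seen p with
  | nil => simp [pvDed]
  | cons s t ih =>
    rw [pvDed, pvPfold_cons]
    by_cases h : (d.contains s && !(PySem.Set.contains seen s)) = true
    · rcases pv_guard_true h with ⟨hc, hns⟩
      have hpcs : p.contains s = false := by
        rw [← Bool.not_eq_true]
        intro hpc
        exact hns ((H1 s hc).mp hpc)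
      rw [if_pos h, if_pos (by rw [hpcs]; rfl)]
      set p' := p.insert s (p.size : Int) with hp'
      have hH1' : ∀ x, d.contains x = true → (p'.contains x = true ↔ x ∈ PySem.Set.add seen s) := by
        intro x hcx
        rw [hp', PySem.Dict.contains_insert, PySem.Set.mem_add]
        constructor
        · intro hor
          rcases Bool.or_eq_true_iff.mp hor with h1 | h1
          · exact Or.inr (by simpa using h1)
          · exact Or.inl ((H1 x hcx).mp h1)
        · rintro (hm | rfl)
          · rw [(H1 x hcx).mpr hm]; simp
          · simp
      refine List.pairwise_cons.mpr ⟨?_, ih _ _ hH1'⟩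
      intro b hb
      rcases (pv_mem_ded d t _ b).mp hb with ⟨hbt, hcb, hbs⟩
      have hbns : b ≠ s := fun he => hbs (he ▸ (PySem.Set.mem_add _ _ _).mpr (Or.inr rfl))
      have hbseen : b ∉ seen := fun hm => hbs ((PySem.Set.mem_add _ _ _).mpr (Or.inl hm))
      have hpb : p'.contains b = false := by
        rw [← Bool.not_eq_true]
        intro hm
        exact hbs ((hH1' b hcb).mp hm)
      have hsval : (pvPfold t p').getD s n = (p.size : Int) := by
        rw [pv_pfold_stable _ _ _ _ (by rw [hp']; exact PySem.Dict.contains_insert_self p s _), hp',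
          PySem.Dict.getD_insert_self]
      have hbval : ((p'.size : Int)) ≤ (pvPfold t p').getD b n := pv_pfold_lower t p' b n hpb hbt
      have hsize : p'.size = p.size + 1 := by
        rw [hp', PySem.Dict.size_insert, hpcs]; simp
      rw [hsval]
      rw [hsize] at hbval
      push_cast at hbval
      omega
    · rw [if_neg h]
      by_cases hps : (!(p.contains s)) = true
      · rw [if_pos hps]
        refine ih _ _ ?_
        intro x hcx
        rw [PySem.Dict.contains_insert]
        constructor
        · intro hor
          rcases Bool.or_eq_true_iff.mp hor with h1 | h1
          · -- x = s: then d.contains s true, guard failed → s ∈ seen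
            have hxe : x = s := by simpa using h1
            subst hxe
            exact pv_guard_false h hcx
          · exact (H1 x hcx).mp h1
        · intro hm
          rw [(H1 x hcx).mpr hm]; simp
      · rw [if_neg hps]
        exact ih _ _ H1

-- ---- the assembly: A's two passes are B's single stable sort ----

theorem ordered_stores_eq_alt (ord : List String) (stores : List (String × Int)) :
    ordered_stores ord stores = ordered_stores_alt ord stores := by
  simp only [ordered_stores, ordered_stores_alt]
  set d := PySem.Dict.ofList stores with hd
  set ks := d.keys with hks
  set n : Int := (ord.length : Int) with hn
  set pos := pvPfold ord PySem.Dict.empty with hpos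
  have hposfold : ord.foldl
      (fun (p : PySem.Dict String Int) s =>
        if !(p.contains s) then p.insert s (p.size : Int) else p) PySem.Dict.empty = pos := rfl
  set key : String → Lex (Int × String) :=
    (fun s => toLex ((pos.getD s n, PySem.Str.lower s) : Int × String)) with hkey
  have hksnd : ks.Nodup := PySem.Dict.nodup_keys_ofList stores
  -- facts about the rank function
  have hf_mem : ∀ x, x ∈ ord → pos.getD x n < n := by
    intro x hx
    have hc : pos.contains x = true := by
      rw [hpos, pv_contains_pfold]
      simp [hx]
    have := pv_pfold_upper ord PySem.Dict.empty x n
      (by intro y hy; rw [PySem.Dict.contains_empty] at hy; cases hy) hc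
    simpa [hn] using this
  have hf_nmem : ∀ x, x ∉ ord → pos.getD x n = n := by
    intro x hx
    apply PySem.Dict.getD_of_not_contains
    rw [hpos, pv_contains_pfold]
    simp [hx, PySem.Dict.contains_empty]
  -- A's value
  rw [pv_pass1_eq d ord PySem.Set.empty []]
  have hsortednd : (PySem.List.sorted ks (fun x => PySem.Str.lower x)).Nodup :=
    ((PySem.List.sorted_perm ks (fun x => PySem.Str.lower x) false).nodup_iff).mpr hksnd
  rw [pv_pass2_eq _ hsortednd]
  simp only [List.nil_append]
  -- replace the seen-filter by the not-in-store_order filter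
  have hfilter_congr :
      (PySem.List.sorted ks (fun x => PySem.Str.lower x)).filter
          (fun s => !(PySem.Set.contains (pvDseen d ord PySem.Set.empty) s))
        = (PySem.List.sorted ks (fun x => PySem.Str.lower x)).filter
          (fun x => !(decide (x ∈ ord))) := by
    apply List.filter_congr
    intro x hx
    have hxks : x ∈ ks := (PySem.List.mem_sorted ks _ false x).mp hx
    have hcx : d.contains x = true := (PySem.Dict.contains_iff_mem_keys d x).mpr hxks
    apply congrArg
    rw [Bool.eq_iff_iff, PySem.Set.contains_iff, pv_mem_dseen, decide_eq_true_eq]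
    constructor
    · rintro (hm | ⟨hmo, _⟩)
      · cases hm
      · exact hmo
    · intro hmo; exact Or.inr ⟨hmo, hcx⟩
  rw [hfilter_congr]
  -- B's sort splits into the two halves
  have hsep : PySem.List.sorted ks key
      = (PySem.List.sorted ks key).filter (fun x => decide (x ∈ ord))
        ++ (PySem.List.sorted ks key).filter (fun x => !(decide (x ∈ ord))) := by
    apply pv_sorted_sep key (fun x => decide (x ∈ ord))
    · exact PySem.List.sorted_pairwise ks key
    · intro a b _ _ hpa hpb
      rw [decide_eq_true_eq] at hpa
      rw [decide_eq_false_iff_not] at hpb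
      rw [hkey, Prod.Lex.lt_iff]
      left
      simp only [ofLex_toLex]
      rw [hf_nmem b hpb]
      exact hf_mem a hpa
  -- left half = A's first pass
  have hleft : (PySem.List.sorted ks key).filter (fun x => decide (x ∈ ord))
      = pvDed d ord PySem.Set.empty := by
    rw [pv_filter_sorted]
    apply PySem.List.sorted_eq_of_perm_of_pairwise_lt
    · rw [List.perm_ext_iff_of_nodup (pv_nodup_ded d ord _) (hksnd.filter _)]
      intro x
      rw [pv_mem_ded, List.mem_filter, decide_eq_true_eq]
      constructor
      · rintro ⟨hmo, hcx, _⟩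
        exact ⟨(PySem.Dict.contains_iff_mem_keys d x).mp hcx, hmo⟩
      · rintro ⟨hxks, hmo⟩
        exact ⟨hmo, (PySem.Dict.contains_iff_mem_keys d x).mpr hxks, by simp [PySem.Set.empty]⟩
    · have hpw := pv_ded_pairwise d n ord PySem.Set.empty PySem.Dict.empty
        (by intro x _; rw [PySem.Dict.contains_empty]; simp [PySem.Set.empty])
      refine hpw.imp ?_
      intro a b hab
      rw [hkey, Prod.Lex.lt_iff]
      left
      simpa using hab
  -- right half = A's second pass
  have hright : (PySem.List.sorted ks key).filter (fun x => !(decide (x ∈ ord)))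
      = (PySem.List.sorted ks (fun x => PySem.Str.lower x)).filter (fun x => !(decide (x ∈ ord))) := by
    rw [pv_filter_sorted, pv_filter_sorted]
    apply pv_sorted_congr
    intro a b ha hb
    rcases List.mem_filter.mp ha with ⟨_, ha2⟩
    rcases List.mem_filter.mp hb with ⟨_, hb2⟩
    rw [Bool.not_eq_true', decide_eq_false_iff_not] at ha2 hb2
    apply decide_eq_decide.mpr
    rw [hkey, Prod.Lex.lt_iff]
    simp only [ofLex_toLex]
    rw [hf_nmem a ha2, hf_nmem b hb2]
    constructor
    · rintro (h | ⟨_, h⟩)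
      · exact absurd h (lt_irrefl n)
      · exact h
    · intro h; exact Or.inr ⟨rfl, h⟩
  rw [← hleft, ← hright, ← hsep]
  rw [hposfold]

-- ===== VERDICT (by name: the statement is the Claim_ definition above) =====
theorem ordered_stores_spec : Claim_equal_ordered_stores := by
  intro store_order stores _
  show ordered_stores store_order stores = ordered_stores_alt store_order stores
  exact ordered_stores_eq_alt store_order stores
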